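-- pv_equiv track=rewrite | github.com/dirkdevriendt/pypeh | src/pypeh/core/interfaces/dataops.py | _collect_required_fields_by_dataset
-- ===== SOURCE A (Python) =====
-- from collections import defaultdict
--
-- def _collect_required_fields_by_dataset(
--     observable_property_context: dict[str, tuple[str, str]],
-- ) -> dict[str, set[str]]:
--     required_fields_by_dataset: dict[str, set[str]] = defaultdict(set)
--     for (
--         source_label,
--         element_label,
--     ) in observable_property_context.values():
--         required_fields_by_dataset[source_label].add(element_label)
--     return required_fields_by_dataset
-- ===== SOURCE B (Python) =====
-- from collections import defaultdict
--
-- def _collect_required_fields_by_dataset(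
--     observable_property_context: dict[str, tuple[str, str]],
-- ) -> dict[str, set[str]]:
--     pairs = list(observable_property_context.values())
--     result: dict[str, set[str]] = defaultdict(set)
--     for src in dict.fromkeys(s for s, _ in pairs):
--         result[src] = {e for s, e in pairs if s == src}
--     return result
-- ===== Notes on version B (the rewrite author's own statement) =====
-- stated objective: alternative
-- what changed: Replaces the single-pass incremental defaultdict bucket accumulation by a two-phase pass: first collect the distinct source labels in first-occurrence order (dict.fromkeys), then build each group's element set with one filtering comprehension per source label.
import Mathlib
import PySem

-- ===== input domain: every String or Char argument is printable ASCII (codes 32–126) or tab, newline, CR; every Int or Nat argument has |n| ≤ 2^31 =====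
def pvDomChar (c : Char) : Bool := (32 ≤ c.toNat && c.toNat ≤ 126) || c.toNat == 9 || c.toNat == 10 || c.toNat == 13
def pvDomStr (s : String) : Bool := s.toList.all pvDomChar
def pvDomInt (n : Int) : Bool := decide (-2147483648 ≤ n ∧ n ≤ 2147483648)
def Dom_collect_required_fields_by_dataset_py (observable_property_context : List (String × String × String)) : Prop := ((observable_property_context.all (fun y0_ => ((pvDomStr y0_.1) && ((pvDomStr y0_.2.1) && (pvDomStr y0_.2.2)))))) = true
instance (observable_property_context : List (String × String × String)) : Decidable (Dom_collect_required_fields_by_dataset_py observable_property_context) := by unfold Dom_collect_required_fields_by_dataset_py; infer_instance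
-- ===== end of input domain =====

-- ===== PORT A =====
-- B changes the decomposition: distinct source labels first, then one filtering pass per label (alternative, not faster).
-- Port of A: fold over the dict's values, bucketing element labels into a defaultdict(set).
def collect_required_fields_by_dataset_py (observable_property_context : List (String × String × String)) : List (String × List String) :=
  let vals := (PySem.Dict.ofList observable_property_context).values
  (vals.foldl (fun d p => d.modify p.1 [] (fun st => PySem.Set.add st p.2))
      (PySem.Dict.empty : PySem.Dict String (PySem.Set String))).items

-- ===== PORT B =====
-- Port of B: dedup the source labels in first-occurrence order, then a set comprehension per label.
def collect_required_fields_by_dataset_py_alt (observable_property_context : List (String × String × String)) : List (String × List String) :=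
  let pairs := (PySem.Dict.ofList observable_property_context).values
  (PySem.List.dedup (pairs.map (·.1))).map
    (fun src => (src, PySem.Set.ofList ((pairs.filter (fun p => p.1 == src)).map (·.2))))

-- ===== PRECONDITION & SPEC =====
def Spec_collect_required_fields_by_dataset_py (observable_property_context : List (String × String × String)) (out : List (String × List String)) : Prop := out = collect_required_fields_by_dataset_py_alt observable_property_context
instance (observable_property_context : List (String × String × String)) (out : List (String × List String)) : Decidable (Spec_collect_required_fields_by_dataset_py observable_property_context out) := by unfold Spec_collect_required_fields_by_dataset_py; infer_instance

-- ===== CLAIM (what is proved, stated in full; the proofs are below) =====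
def Claim_equal_collect_required_fields_by_dataset_py : Prop := ∀ (observable_property_context : List (String × String × String)), Dom_collect_required_fields_by_dataset_py observable_property_context → Spec_collect_required_fields_by_dataset_py observable_property_context (collect_required_fields_by_dataset_py observable_property_context)

-- ===== LEMMAS AND PROOFS =====
-- The bucket of A's grouping loop at key c is the set of elements whose pair carries source c, in encounter order.
theorem getD_group_loop (l : List (String × String)) (d : PySem.Dict String (PySem.Set String)) (c : String) :
    (l.foldl (fun d p => d.modify p.1 [] (fun st => PySem.Set.add st p.2)) d).getD c []
      = PySem.Set.update (d.getD c []) ((l.filter (fun p => p.1 == c)).map (·.2)) := by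
  induction l generalizing d with
  | nil => rfl
  | cons p l ih =>
    rcases p with ⟨s, e⟩
    by_cases h : s = c
    · subst h
      simp only [List.foldl_cons, List.filter_cons, beq_self_eq_true, if_pos, List.map_cons, ih,
        PySem.Dict.getD_modify_self]
      rfl
    · simp only [List.foldl_cons, List.filter_cons, ih]
      rw [PySem.Dict.getD_modify_of_ne _ _ _ (fun hne => h hne.symm)]
      simp [h]

-- ===== VERDICT (by name: the statement is the Claim_ definition above) =====
theorem collect_required_fields_by_dataset_py_spec : Claim_equal_collect_required_fields_by_dataset_py := by
  intro ctx _
  unfold Spec_collect_required_fields_by_dataset_py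
  unfold collect_required_fields_by_dataset_py collect_required_fields_by_dataset_py_alt
  set vals := (PySem.Dict.ofList ctx).values with hv
  set d := vals.foldl (fun d p => d.modify p.1 [] (fun st => PySem.Set.add st p.2))
      (PySem.Dict.empty : PySem.Dict String (PySem.Set String)) with hd
  have hnd : d.keys.Nodup := by
    rw [hd]
    exact PySem.Dict.nodup_keys_foldl_modify_key vals (·.1) [] _ _ PySem.Dict.nodup_keys_empty
  have hkeys : d.keys = PySem.List.dedup (vals.map (·.1)) := by
    rw [hd]
    rw [PySem.Dict.keys_foldl_modify_key]
    simp [PySem.Dict.keys_empty, PySem.Set.update, PySem.Set.ofList_eq_foldl]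
  rw [PySem.Dict.items_eq_map_keys d hnd [], hkeys]
  apply List.map_congr_left
  intro c _
  rw [hd, getD_group_loop]
  simp [PySem.Dict.getD_empty, PySem.Set.update, PySem.Set.ofList_eq_foldl]
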